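-- pv_equiv track=rewrite | github.com/snedea/brainbot | brainbot/memory/brain.py | _extract_memory_summary
-- ===== SOURCE A (Python) =====
-- def _extract_memory_summary(filename: str, content: str) -> str:
--     """
--     Extract a brief summary from a memory file.
--
--     Pulls out:
--     - Title (first # heading)
--     - Category/date from filename
--     - First paragraph or key bullet points
--     - Any TODO/goal items
--     """
--     lines = content.split('\n')
--
--     # Extract title
--     title = filename
--     for line in lines:
--         if line.startswith('# '):
--             title = line[2:].strip()
--             break
--
--     # Extract first meaningful paragraph (skip metadata)
--     first_para = ""
--     in_content = False
--     para_lines = []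
--
--     for line in lines:
--         # Skip until we pass the --- separator
--         if line.startswith('---'):
--             in_content = True
--             continue
--
--         if in_content and line.strip():
--             # Skip metadata lines
--             if line.startswith('*') and ('Created:' in line or 'Updated:' in line or 'Category:' in line):
--                 continue
--
--             para_lines.append(line)
--             if len(para_lines) >= 3:  # First 3 meaningful lines
--                 break
--
--     first_para = ' '.join(para_lines)[:200]
--     if len(first_para) == 200:
--         first_para += "..."
--
--     # Extract any TODO items
--     todos = []
--     for line in lines:
--         if '[ ]' in line or '[x]' in line:
--             todos.append(line.strip())
--             if len(todos) >= 3: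
--                 break
--
--     # Build summary
--     summary = f"\n## {title}\n"
--     summary += f"*File: `{filename}`*\n\n"
--
--     if first_para:
--         summary += f"{first_para}\n"
--
--     if todos:
--         summary += "\n**Tasks:**\n"
--         for todo in todos:
--             summary += f"{todo}\n"
--
--     return summary
-- ===== SOURCE B (Python) =====
-- def _extract_memory_summary(filename: str, content: str) -> str:
--     """Single-pass rewrite: one loop over the lines feeds title, paragraph
--     and todo buckets in parallel instead of three separate scans."""
--     lines = content.split('\n')
--
--     title = None
--     in_content = False
--     para_lines = []
--     todos = []
--
--     for line in lines:
--         if title is None and line.startswith('# '):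
--             title = line[2:].strip()
--         if ('[ ]' in line or '[x]' in line) and len(todos) < 3:
--             todos.append(line.strip())
--         if line.startswith('---'):
--             in_content = True
--         elif (in_content and line.strip() and len(para_lines) < 3
--               and not (line.startswith('*') and
--                        ('Created:' in line or 'Updated:' in line or 'Category:' in line))):
--             para_lines.append(line)
--
--     if title is None:
--         title = filename
--
--     first_para = ' '.join(para_lines)[:200]
--     if len(first_para) == 200:
--         first_para += "..."
--
--     summary = f"\n## {title}\n"
--     summary += f"*File: `{filename}`*\n\n"
--     if first_para:
--         summary += f"{first_para}\n"
--     if todos: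
--         summary += "\n**Tasks:**\n"
--         for todo in todos:
--             summary += f"{todo}\n"
--     return summary
-- ===== Notes on version B (the rewrite author's own statement) =====
-- stated objective: alternative
-- what changed: The three separate scans over the lines (title scan, paragraph scan, todo scan) are fused into one pass that maintains all four pieces of state in parallel; the summary assembly is unchanged.
import Mathlib
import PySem

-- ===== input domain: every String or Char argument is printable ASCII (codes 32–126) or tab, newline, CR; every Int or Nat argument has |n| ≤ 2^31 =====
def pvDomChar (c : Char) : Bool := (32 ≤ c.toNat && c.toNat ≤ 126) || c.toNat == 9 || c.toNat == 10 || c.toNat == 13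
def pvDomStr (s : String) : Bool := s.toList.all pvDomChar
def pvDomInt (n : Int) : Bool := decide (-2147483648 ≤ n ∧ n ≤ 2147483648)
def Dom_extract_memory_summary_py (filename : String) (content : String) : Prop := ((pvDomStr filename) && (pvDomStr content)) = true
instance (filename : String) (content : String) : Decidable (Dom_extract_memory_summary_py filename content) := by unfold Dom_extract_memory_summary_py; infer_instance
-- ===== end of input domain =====

-- B fuses A's three scans over the lines into a single pass with parallel state; the summary assembly is unchanged.

-- ===== PORT A =====
-- shared helpers: both Pythons test these identical conditions / build the identical tail
def pvIsMeta (l : String) : Bool :=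
  PySem.Str.startswith l "*" &&
    (PySem.Str.isIn "Created:" l || PySem.Str.isIn "Updated:" l || PySem.Str.isIn "Category:" l)

def pvIsTodo (l : String) : Bool :=
  PySem.Str.isIn "[ ]" l || PySem.Str.isIn "[x]" l

-- identical tail of both Pythons: join/truncate the first paragraph, assemble the summary
def pvBuildSummary (filename : String) (title : String) (para : List String) (todos : List String) : String :=
  let fp := PySem.Str.slice (PySem.Str.join " " para) none (some 200)
  let fp := if PySem.Str.len fp == 200 then PySem.Str.join "" [fp, "..."] else fp
  let s := PySem.Str.join "" ["\n## ", title, "\n"]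
  let s := PySem.Str.join "" [s, "*File: `", filename, "`*\n\n"]
  let s := if fp ≠ "" then PySem.Str.join "" [s, fp, "\n"] else s
  if todos ≠ [] then
    todos.foldl (fun acc t => PySem.Str.join "" [acc, t, "\n"]) (PySem.Str.join "" [s, "\n**Tasks:**\n"])
  else s

-- A's first loop: first '# ' heading (with break), else the filename
def pvTitleLoopA : List String → String → String
  | [], title => title
  | l :: ls, title =>
    if PySem.Str.startswith l "# " then PySem.Str.strip (PySem.Str.slice l (some 2) none)
    else pvTitleLoopA ls title

-- A's second loop: first 3 meaningful lines after '---' (with break)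
def pvParaLoopA : List String → Bool → List String → List String
  | [], _, acc => acc
  | l :: ls, ic, acc =>
    if PySem.Str.startswith l "---" then pvParaLoopA ls true acc
    else if ic && !(PySem.Str.strip l == "") then
      if pvIsMeta l then pvParaLoopA ls ic acc
      else if 3 ≤ (acc ++ [l]).length then acc ++ [l] else pvParaLoopA ls ic (acc ++ [l])
    else pvParaLoopA ls ic acc

-- A's third loop: first 3 todo lines (with break)
def pvTodoLoopA : List String → List String → List String
  | [], acc => acc
  | l :: ls, acc =>
    if pvIsTodo l then
      if 3 ≤ (acc ++ [PySem.Str.strip l]).length then acc ++ [PySem.Str.strip l]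
      else pvTodoLoopA ls (acc ++ [PySem.Str.strip l])
    else pvTodoLoopA ls acc

def extract_memory_summary_py (filename : String) (content : String) : String :=
  let lines := (PySem.Str.split? content "\n").getD []   -- sep "\n" ≠ "", so split? is always `some`
  let title := pvTitleLoopA lines filename
  let para := pvParaLoopA lines false []
  let todos := pvTodoLoopA lines []
  pvBuildSummary filename title para todos

-- ===== PORT B =====
-- B's single pass: state (title?, in_content, para_lines, todos), parallel checks per line
def pvStepTitle (l : String) (t : Option String) : Option String :=
  if t.isNone && PySem.Str.startswith l "# " then
    some (PySem.Str.strip (PySem.Str.slice l (some 2) none)) else t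

def pvStepTodos (l : String) (todos : List String) : List String :=
  if pvIsTodo l && todos.length < 3 then todos ++ [PySem.Str.strip l] else todos

def pvLoopB : List String → Option String × Bool × List String × List String →
    Option String × Bool × List String × List String
  | [], st => st
  | l :: ls, (t, ic, para, todos) =>
    let t := pvStepTitle l t
    let todos := pvStepTodos l todos
    if PySem.Str.startswith l "---" then pvLoopB ls (t, true, para, todos)
    else if ic && !(PySem.Str.strip l == "") && para.length < 3 && !(pvIsMeta l) then
      pvLoopB ls (t, ic, para ++ [l], todos)
    else pvLoopB ls (t, ic, para, todos)

def extract_memory_summary_py_alt (filename : String) (content : String) : String :=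
  let lines := (PySem.Str.split? content "\n").getD []   -- sep "\n" ≠ "", so split? is always `some`
  let st := pvLoopB lines (none, false, [], [])
  let title := st.1.getD filename
  pvBuildSummary filename title st.2.2.1 st.2.2.2

-- ===== PRECONDITION & SPEC =====
def Spec_extract_memory_summary_py (filename : String) (content : String) (out : String) : Prop := out = extract_memory_summary_py_alt filename content
instance (filename : String) (content : String) (out : String) : Decidable (Spec_extract_memory_summary_py filename content out) := by unfold Spec_extract_memory_summary_py; infer_instance

-- ===== CLAIM (what is proved, stated in full; the proofs are below) =====
def Claim_equal_extract_memory_summary_py : Prop := ∀ (filename : String) (content : String), Dom_extract_memory_summary_py filename content → Spec_extract_memory_summary_py filename content (extract_memory_summary_py filename content)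

theorem pvLoopB_fst_some (ls : List String) (x : String) (ic : Bool) (p td : List String) :
    (pvLoopB ls (some x, ic, p, td)).1 = some x := by
  induction ls generalizing ic p td with
  | nil => rfl
  | cons l ls ih =>
    have ht : pvStepTitle l (some x) = some x := rfl
    simp only [pvLoopB, ht]
    split_ifs <;> exact ih ..

theorem pvLoopB_fst (ls : List String) (ic : Bool) (p td : List String) (f : String) :
    ((pvLoopB ls (none, ic, p, td)).1).getD f = pvTitleLoopA ls f := by
  induction ls generalizing ic p td with
  | nil => rfl
  | cons l ls ih =>
    simp only [pvLoopB, pvTitleLoopA]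
    by_cases h : PySem.Str.startswith l "# " = true
    · have ht : pvStepTitle l none = some (PySem.Str.strip (PySem.Str.slice l (some 2) none)) := by
        simp only [pvStepTitle, Option.isNone_none, Bool.true_and]
        rw [if_pos h]
      rw [ht, if_pos h]
      split_ifs <;> simp [pvLoopB_fst_some]
    · have ht : pvStepTitle l none = none := by
        simp only [pvStepTitle, Option.isNone_none, Bool.true_and]
        rw [if_neg h]
      rw [ht, if_neg h]
      split_ifs <;> exact ih ..

theorem pvLoopB_todos_full (ls : List String) (t : Option String) (ic : Bool) (p td : List String)
    (h : 3 ≤ td.length) : (pvLoopB ls (t, ic, p, td)).2.2.2 = td := by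
  induction ls generalizing t ic p with
  | nil => rfl
  | cons l ls ih =>
    have htd : pvStepTodos l td = td := by
      have : ¬ td.length < 3 := by omega
      simp [pvStepTodos, this]
    simp only [pvLoopB, htd]
    split_ifs <;> exact ih ..

theorem pvLoopB_todos (ls : List String) (t : Option String) (ic : Bool) (p td : List String)
    (h : td.length < 3) : (pvLoopB ls (t, ic, p, td)).2.2.2 = pvTodoLoopA ls td := by
  induction ls generalizing t ic p td with
  | nil => rfl
  | cons l ls ih =>
    simp only [pvLoopB, pvTodoLoopA]
    by_cases hto : pvIsTodo l = true
    · have htd : pvStepTodos l td = td ++ [PySem.Str.strip l] := by simp [pvStepTodos, hto, h]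
      rw [htd, if_pos hto]
      by_cases hfull : 3 ≤ (td ++ [PySem.Str.strip l]).length
      · rw [if_pos hfull]
        split_ifs <;> exact pvLoopB_todos_full ls _ _ _ _ hfull
      · rw [if_neg hfull]
        split_ifs <;> exact ih _ _ _ _ (by omega)
    · have htd : pvStepTodos l td = td := by simp [pvStepTodos, hto]
      rw [htd, if_neg hto]
      split_ifs <;> exact ih _ _ _ _ h

theorem pvLoopB_para_full (ls : List String) (t : Option String) (ic : Bool) (p td : List String)
    (h : 3 ≤ p.length) : (pvLoopB ls (t, ic, p, td)).2.2.1 = p := by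
  induction ls generalizing t ic td with
  | nil => rfl
  | cons l ls ih =>
    have hguard : ¬ ((ic && !(PySem.Str.strip l == "") && decide (p.length < 3) && !(pvIsMeta l)) = true) := by
      have hlt : ¬ p.length < 3 := by omega
      simp [hlt]
    simp only [pvLoopB]
    by_cases hsep : PySem.Str.startswith l "---" = true
    · rw [if_pos hsep]; exact ih ..
    · rw [if_neg hsep, if_neg hguard]; exact ih ..

theorem pvLoopB_para (ls : List String) (t : Option String) (ic : Bool) (p td : List String)
    (h : p.length < 3) : (pvLoopB ls (t, ic, p, td)).2.2.1 = pvParaLoopA ls ic p := by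
  induction ls generalizing t ic p td with
  | nil => rfl
  | cons l ls ih =>
    simp only [pvLoopB, pvParaLoopA]
    by_cases hsep : PySem.Str.startswith l "---" = true
    · rw [if_pos hsep, if_pos hsep]
      exact ih _ _ _ _ h
    · rw [if_neg hsep, if_neg hsep]
      by_cases hic : (ic && !(PySem.Str.strip l == "")) = true
      · rw [if_pos hic]
        by_cases hm : pvIsMeta l = true
        · have hguard : ¬ ((ic && !(PySem.Str.strip l == "") && decide (p.length < 3) && !(pvIsMeta l)) = true) := by
            simp [hm]
          rw [if_neg hguard, if_pos hm]
          exact ih _ _ _ _ h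
        · have hguard : (ic && !(PySem.Str.strip l == "") && decide (p.length < 3) && !(pvIsMeta l)) = true := by
            simp only [Bool.and_eq_true] at hic ⊢
            exact ⟨⟨⟨hic.1, hic.2⟩, by simp [h]⟩, by simp [hm]⟩
          rw [if_pos hguard, if_neg hm]
          by_cases hfull : 3 ≤ (p ++ [l]).length
          · rw [if_pos hfull]
            exact pvLoopB_para_full ls _ _ _ _ hfull
          · rw [if_neg hfull]
            exact ih _ _ _ _ (by omega)
      · have hic' : (ic && !(PySem.Str.strip l == "")) = false := Bool.eq_false_iff.mpr hic
        have hguard : ¬ ((ic && !(PySem.Str.strip l == "") && decide (p.length < 3) && !(pvIsMeta l)) = true) := by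
          simp [hic']
        rw [if_neg hguard, if_neg hic]
        exact ih _ _ _ _ h

-- ===== VERDICT (by name: the statement is the Claim_ definition above) =====
theorem extract_memory_summary_py_spec : Claim_equal_extract_memory_summary_py := by
  intro filename content _
  unfold Spec_extract_memory_summary_py
  simp only [extract_memory_summary_py, extract_memory_summary_py_alt]
  rw [pvLoopB_fst _ false [] [] filename,
      pvLoopB_para _ none false [] [] (by simp),
      pvLoopB_todos _ none false [] [] (by simp)]
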